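-- pv_equiv track=rewrite | github.com/uniba-mi/quare | backend/evaluation.py | process_verbalized_explanation
-- ===== SOURCE A (Python) =====
-- def process_verbalized_explanation(verbalized_explanation: list[str]) -> dict[str, bool]:
--     possible_messages_with_mapping: dict[str, str] = {
--         "The repository has no description and no README file.": "DescriptionOrReadme",
--         "No persistent ID was found.": "PersistentId",
--         "The repository is private.": "PublicRepository",
--         "There are no releases or Semantic Versioning is violated.": "SemanticVersioning",
--         "There is no README file or it does not contain usage instructions for the software.": "UsageNotesInReadme",
--         "No license information was found.": "ExactlyOneLicense",
--         "No citation information was found.": "ExplicitCitation",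
--         "The repository has no description and no topics assigned.": "DescriptionOrAtLeastOneTopic",
--         "There is no README file or it does not contain installation instructions.": "InstallationInstructionsInReadme",
--         "No information on the requirements of the software was found.": "SoftwareRequirements"
--     }
--
--     result_per_criterion: dict[str, bool] = {}
--     for possible_message, mapping in possible_messages_with_mapping.items():
--         if any(actual_message.startswith(possible_message) for actual_message in verbalized_explanation):
--             result_per_criterion[mapping] = False
--         else:
--             result_per_criterion[mapping] = True
--
--     return result_per_criterion
-- ===== SOURCE B (Python) =====
-- def process_verbalized_explanation(verbalized_explanation: list[str]) -> dict[str, bool]: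
--     possible_messages_with_mapping: dict[str, str] = {
--         "The repository has no description and no README file.": "DescriptionOrReadme",
--         "No persistent ID was found.": "PersistentId",
--         "The repository is private.": "PublicRepository",
--         "There are no releases or Semantic Versioning is violated.": "SemanticVersioning",
--         "There is no README file or it does not contain usage instructions for the software.": "UsageNotesInReadme",
--         "No license information was found.": "ExactlyOneLicense",
--         "No citation information was found.": "ExplicitCitation",
--         "The repository has no description and no topics assigned.": "DescriptionOrAtLeastOneTopic",
--         "There is no README file or it does not contain installation instructions.": "InstallationInstructionsInReadme",
--         "No information on the requirements of the software was found.": "SoftwareRequirements"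
--     }
--
--     # length-bucketed dictionary matching: instead of comparing each line against
--     # each message with startswith, slice each line at the few distinct message
--     # lengths and look the slice up exactly in the message table, collecting the
--     # set of violated criteria in a single pass; then read the result off the set
--     prefix_lengths = sorted({len(message) for message in possible_messages_with_mapping})
--
--     violated: set[str] = set()
--     for actual_message in verbalized_explanation:
--         for length in prefix_lengths:
--             mapping = possible_messages_with_mapping.get(actual_message[:length])
--             if mapping is not None:
--                 violated.add(mapping)
--
--     return {mapping: mapping not in violated
--             for mapping in possible_messages_with_mapping.values()}
-- ===== Notes on version B (the rewrite author's own statement) =====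
-- stated objective: alternative
-- what changed: B replaces A's per-message startswith scans of the input by length-bucketed dictionary matching: each line is sliced at the 9 distinct message lengths and the slice is looked up exactly (hashed) in the message table, accumulating a set of violated criteria in one pass, from which the result dict is read off.
import Mathlib
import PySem

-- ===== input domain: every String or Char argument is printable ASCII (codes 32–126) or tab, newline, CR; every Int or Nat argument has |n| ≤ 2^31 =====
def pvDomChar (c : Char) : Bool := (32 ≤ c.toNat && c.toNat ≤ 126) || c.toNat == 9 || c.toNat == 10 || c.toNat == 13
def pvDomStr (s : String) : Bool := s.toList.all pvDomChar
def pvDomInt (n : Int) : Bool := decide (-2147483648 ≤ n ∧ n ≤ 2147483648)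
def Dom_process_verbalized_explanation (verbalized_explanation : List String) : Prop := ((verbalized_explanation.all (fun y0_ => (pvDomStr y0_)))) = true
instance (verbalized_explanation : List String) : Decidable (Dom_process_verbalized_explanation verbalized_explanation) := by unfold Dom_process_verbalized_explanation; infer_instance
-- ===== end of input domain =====

-- B replaces A's per-message startswith scans by length-bucketed dictionary matching: each
-- line is sliced at the distinct message lengths and looked up exactly in the message table,
-- accumulating a set of violated criteria in one pass (objective: alternative).

-- ===== PORT A =====
-- the fixed message → criterion table (shared data of both ports)
def pvTable : List (String × String) :=
  [("The repository has no description and no README file.", "DescriptionOrReadme"),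
   ("No persistent ID was found.", "PersistentId"),
   ("The repository is private.", "PublicRepository"),
   ("There are no releases or Semantic Versioning is violated.", "SemanticVersioning"),
   ("There is no README file or it does not contain usage instructions for the software.", "UsageNotesInReadme"),
   ("No license information was found.", "ExactlyOneLicense"),
   ("No citation information was found.", "ExplicitCitation"),
   ("The repository has no description and no topics assigned.", "DescriptionOrAtLeastOneTopic"),
   ("There is no README file or it does not contain installation instructions.", "InstallationInstructionsInReadme"),
   ("No information on the requirements of the software was found.", "SoftwareRequirements")]

def process_verbalized_explanation (verbalized_explanation : List String) : List (String × Bool) :=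
  (pvTable.foldl
    (fun d pm =>
      if verbalized_explanation.any (fun actual_message => PySem.Str.startswith actual_message pm.1)
      then d.insert pm.2 false
      else d.insert pm.2 true)
    PySem.Dict.empty).items

-- ===== PORT B =====
-- sorted({len(message) for message in possible_messages_with_mapping})
def pvPrefixLengths : List Int :=
  PySem.List.sorted (PySem.Set.ofList (pvTable.map (fun pm => PySem.Str.len pm.1))) (fun x => x) false

-- possible_messages_with_mapping.get(actual_message[:length])
def pvLookup (actual_message : String) (length : Int) : Option String :=
  (PySem.Dict.mk pvTable).get? (PySem.Str.slice actual_message none (some length))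

def process_verbalized_explanation_alt (verbalized_explanation : List String) : List (String × Bool) :=
  let violated : PySem.Set String :=
    verbalized_explanation.foldl
      (fun s actual_message =>
        pvPrefixLengths.foldl
          (fun s length =>
            match pvLookup actual_message length with
            | some mapping => PySem.Set.add s mapping
            | none => s)
          s)
      PySem.Set.empty
  (pvTable.foldl
    (fun d pm => PySem.Dict.insert d pm.2 (!(PySem.Set.contains violated pm.2)))
    PySem.Dict.empty).items

-- ===== PRECONDITION & SPEC =====
def Spec_process_verbalized_explanation (verbalized_explanation : List String) (out : List (String × Bool)) : Prop := out = process_verbalized_explanation_alt verbalized_explanation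
instance (verbalized_explanation : List String) (out : List (String × Bool)) : Decidable (Spec_process_verbalized_explanation verbalized_explanation out) := by unfold Spec_process_verbalized_explanation; infer_instance

-- ===== CLAIM (what is proved, stated in full; the proofs are below) =====
def Claim_equal_process_verbalized_explanation : Prop := ∀ (verbalized_explanation : List String), Dom_process_verbalized_explanation verbalized_explanation → Spec_process_verbalized_explanation verbalized_explanation (process_verbalized_explanation verbalized_explanation)

-- ===== LEMMAS AND PROOFS =====

-- the distinct message lengths, evaluated
set_option maxHeartbeats 4000000 in
theorem pv_lens_eq : pvPrefixLengths = [26, 27, 33, 34, 53, 57, 61, 73, 83] := by decide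

-- membership after a fold that conditionally adds the result of a lookup
theorem pv_mem_foldl_optAdd {β : Type} (f : β → Option String) (ls : List β)
    (s : PySem.Set String) (x : String) :
    (x ∈ ls.foldl (fun s l => match f l with | some m => PySem.Set.add s m | none => s) s)
      ↔ x ∈ s ∨ ∃ l ∈ ls, f l = some x := by
  induction ls generalizing s with
  | nil => simp
  | cons a t ih =>
    simp only [List.foldl_cons]
    cases h : f a with
    | none => rw [ih]; simp [h]
    | some m => rw [ih, PySem.Set.mem_add]; simp [h]; tauto

-- membership in B's violated set
set_option maxHeartbeats 1000000 in
theorem pv_mem_violated (ve : List String) (s : PySem.Set String) (x : String) :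
    (x ∈ ve.foldl (fun s actual_message =>
        pvPrefixLengths.foldl
          (fun s length =>
            match pvLookup actual_message length with
            | some mapping => PySem.Set.add s mapping
            | none => s)
          s) s)
      ↔ x ∈ s ∨ ∃ a ∈ ve, ∃ L ∈ pvPrefixLengths, pvLookup a L = some x := by
  induction ve generalizing s with
  | nil => simp
  | cons a t ih => rw [List.foldl_cons, ih, pv_mem_foldl_optAdd (pvLookup a) pvPrefixLengths]; simp only [List.mem_cons, exists_eq_or_imp]; rw [or_assoc]

-- a hit of the lookup at some bucketed length is exactly a startswith match
theorem pv_hit_iff (a msg p : String)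
    (hget : (PySem.Dict.mk pvTable).get? msg = some p)
    (hlen : PySem.Str.len msg ∈ pvPrefixLengths)
    (hU : pvTable.all (fun pm => !(pm.2 == p) || (pm.1 == msg)) = true) :
    (∃ L ∈ pvPrefixLengths, pvLookup a L = some p) ↔ PySem.Str.startswith a msg = true := by
  constructor
  · rintro ⟨L, hL, hlook⟩
    have h0 : (0 : Int) ≤ L := by
      rw [pv_lens_eq] at hL; fin_cases hL <;> decide
    obtain ⟨pm, hfind, hp⟩ := Option.map_eq_some_iff.mp hlook
    have hpmmem : pm ∈ pvTable := List.mem_of_find?_eq_some hfind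
    have hpm1 : pm.1 = PySem.Str.slice a none (some L) := by
      have := List.find?_some hfind
      exact eq_of_beq this
    have hmsg : pm.1 = msg := by
      have := List.all_eq_true.mp hU pm hpmmem
      simp only [Bool.or_eq_true, Bool.not_eq_true', beq_eq_false_iff_ne, beq_iff_eq] at this
      rcases this with h | h
      · exact absurd hp h
      · exact h
    have hslice : msg.toList = a.toList.take L.toNat := by
      have := congrArg String.toList (hmsg.symm.trans hpm1)
      rwa [PySem.Str.toList_slice, PySem.Chars.slice_eq_listSlice,
        PySem.List.slice_to _ h0] at this
    rw [PySem.Str.startswith_eq, PySem.Chars.startswith_iff]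
    exact hslice ▸ List.take_prefix _ _
  · intro hsw
    refine ⟨PySem.Str.len msg, hlen, ?_⟩
    have hpre : msg.toList <+: a.toList := by
      rw [PySem.Str.startswith_eq, PySem.Chars.startswith_iff] at hsw
      exact hsw
    have hslice : PySem.Str.slice a none (some (PySem.Str.len msg)) = msg := by
      apply String.toList_inj.mp
      rw [PySem.Str.toList_slice, PySem.Chars.slice_eq_listSlice, PySem.Str.len_eq,
        PySem.List.slice_to _ (Int.natCast_nonneg _)]
      simp only [Int.toNat_natCast]
      exact (List.prefix_iff_eq_take.mp hpre).symm
    simp only [pvLookup]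
    rw [hslice, hget]

-- B's set query for one criterion equals A's any-startswith scan for its message
theorem pv_contains_char (ve : List String) (msg p : String)
    (hget : (PySem.Dict.mk pvTable).get? msg = some p)
    (hlen : PySem.Str.len msg ∈ pvPrefixLengths)
    (hU : pvTable.all (fun pm => !(pm.2 == p) || (pm.1 == msg)) = true) :
    PySem.Set.contains
      (ve.foldl (fun s actual_message =>
        pvPrefixLengths.foldl
          (fun s length =>
            match pvLookup actual_message length with
            | some mapping => PySem.Set.add s mapping
            | none => s)
          s) PySem.Set.empty) p
      = ve.any (fun actual_message => PySem.Str.startswith actual_message msg) := by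
  rw [Bool.eq_iff_iff]
  simp only [PySem.Set.contains]
  rw [List.contains_iff_mem, pv_mem_violated, List.any_eq_true]
  constructor
  · rintro (h | ⟨a, ha, hhit⟩)
    · exact absurd h (by simp [PySem.Set.empty])
    · exact ⟨a, ha, (pv_hit_iff a msg p hget hlen hU).mp hhit⟩
  · rintro ⟨a, ha, hsw⟩
    exact Or.inr ⟨a, ha, (pv_hit_iff a msg p hget hlen hU).mpr hsw⟩

-- ===== VERDICT (by name: the statement is the Claim_ definition above) =====
set_option maxHeartbeats 4000000 in
theorem process_verbalized_explanation_spec : Claim_equal_process_verbalized_explanation := by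
  intro ve _
  show process_verbalized_explanation ve = process_verbalized_explanation_alt ve
  simp only [process_verbalized_explanation, process_verbalized_explanation_alt]
  rw [PySem.List.foldl_congr_mem pvTable _
      (fun d pm =>
        PySem.Dict.insert d pm.2
          (!ve.any (fun actual_message => PySem.Str.startswith actual_message pm.1)))
      PySem.Dict.empty
      (by intro d pm _
          cases h : ve.any (fun actual_message => PySem.Str.startswith actual_message pm.1) <;>
            simp only [h] <;> rfl)]
  refine congrArg PySem.Dict.items (PySem.List.foldl_congr_mem _ _ _ _ ?_)
  intro d pm hpm
  simp only [pvTable, List.mem_cons, List.not_mem_nil, or_false] at hpm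
  rcases hpm with rfl | rfl | rfl | rfl | rfl | rfl | rfl | rfl | rfl | rfl
  · rw [pv_contains_char ve "The repository has no description and no README file." "DescriptionOrReadme" (by decide) (by decide) (by decide)]
  · rw [pv_contains_char ve "No persistent ID was found." "PersistentId" (by decide) (by decide) (by decide)]
  · rw [pv_contains_char ve "The repository is private." "PublicRepository" (by decide) (by decide) (by decide)]
  · rw [pv_contains_char ve "There are no releases or Semantic Versioning is violated." "SemanticVersioning" (by decide) (by decide) (by decide)]
  · rw [pv_contains_char ve "There is no README file or it does not contain usage instructions for the software." "UsageNotesInReadme" (by decide) (by decide) (by decide)]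
  · rw [pv_contains_char ve "No license information was found." "ExactlyOneLicense" (by decide) (by decide) (by decide)]
  · rw [pv_contains_char ve "No citation information was found." "ExplicitCitation" (by decide) (by decide) (by decide)]
  · rw [pv_contains_char ve "The repository has no description and no topics assigned." "DescriptionOrAtLeastOneTopic" (by decide) (by decide) (by decide)]
  · rw [pv_contains_char ve "There is no README file or it does not contain installation instructions." "InstallationInstructionsInReadme" (by decide) (by decide) (by decide)]
  · rw [pv_contains_char ve "No information on the requirements of the software was found." "SoftwareRequirements" (by decide) (by decide) (by decide)]
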